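-- pv_equiv track=rewrite | github.com/Porches2/Reade | backend/pdf_parser.py | find_relevant_chunks
-- ===== SOURCE A (Python) =====
-- def find_relevant_chunks(pages: list[dict], query: str, top_k: int = 5) -> list[dict]:
--     """Simple keyword-based retrieval: score pages by query term overlap."""
--     query_terms = set(query.lower().split())
--     scored = []
--     for page in pages:
--         page_terms = set(page["text"].lower().split())
--         overlap = len(query_terms & page_terms)
--         if overlap > 0 or not query_terms:
--             scored.append((overlap, page))
--     scored.sort(key=lambda x: x[0], reverse=True)
--     return [page for _, page in scored[:top_k]]
-- ===== SOURCE B (Python) =====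
-- def find_relevant_chunks(pages: list[dict], query: str, top_k: int = 5) -> list[dict]:
--     """Bucket pages by overlap score, then emit buckets from the highest score down (counting sort)."""
--     query_terms = set(query.lower().split())
--     buckets = {}
--     for page in pages:
--         overlap = len(query_terms & set(page["text"].lower().split()))
--         if overlap > 0 or not query_terms:
--             buckets.setdefault(overlap, []).append(page)
--     ranked = []
--     for score in range(len(query_terms), -1, -1):
--         ranked.extend(buckets.get(score, []))
--     return ranked[:top_k]
-- ===== Notes on version B (the rewrite author's own statement) =====
-- stated objective: alternative
-- what changed: Replaces the comparison sort of (score, page) pairs by a one-pass score->pages bucket dict followed by a counting-sort style walk over scores from len(query_terms) down to 0.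
import Mathlib
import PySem

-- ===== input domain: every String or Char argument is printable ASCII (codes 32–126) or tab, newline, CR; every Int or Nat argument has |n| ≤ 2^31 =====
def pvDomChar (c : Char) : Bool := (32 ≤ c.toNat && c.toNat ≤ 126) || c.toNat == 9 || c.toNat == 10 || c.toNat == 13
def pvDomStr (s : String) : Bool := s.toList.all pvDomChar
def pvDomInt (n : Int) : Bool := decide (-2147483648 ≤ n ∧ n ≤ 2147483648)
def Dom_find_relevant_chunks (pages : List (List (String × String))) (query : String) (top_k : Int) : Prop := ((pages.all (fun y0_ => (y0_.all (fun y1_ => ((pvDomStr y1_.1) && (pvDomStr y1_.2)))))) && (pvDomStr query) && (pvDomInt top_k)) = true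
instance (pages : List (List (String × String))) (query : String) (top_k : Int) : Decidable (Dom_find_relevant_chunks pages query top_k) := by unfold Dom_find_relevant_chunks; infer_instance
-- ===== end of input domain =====

-- B replaces A's comparison sort by a score->pages bucket dict emitted from the top score down (alternative algorithm, same results).

-- ===== PORT A =====
def find_relevant_chunks (pages : List (List (String × String))) (query : String) (top_k : Int) : List (List (String × String)) :=
  let query_terms : PySem.Set String := PySem.Set.ofList (PySem.Str.split₀ (PySem.Str.lower query))
  let scored : List (Int × List (String × String)) :=
    pages.foldl (fun scored page =>
      let page_terms : PySem.Set String :=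
        PySem.Set.ofList (PySem.Str.split₀ (PySem.Str.lower (PySem.Dict.getD (PySem.Dict.mk page) "text" "")))
      let overlap : Int := PySem.Set.len (PySem.Set.inter query_terms page_terms)
      if decide (0 < overlap) || query_terms.isEmpty then scored ++ [(overlap, page)] else scored) []
  let sortedScored := PySem.List.sorted scored (fun x => x.1) true
  (PySem.List.slice sortedScored none (some top_k)).map (fun x => x.2)

-- ===== PORT B =====
def find_relevant_chunks_alt (pages : List (List (String × String))) (query : String) (top_k : Int) : List (List (String × String)) :=
  let query_terms : PySem.Set String := PySem.Set.ofList (PySem.Str.split₀ (PySem.Str.lower query))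
  let buckets : PySem.Dict Int (List (List (String × String))) :=
    pages.foldl (fun buckets page =>
      let overlap : Int := PySem.Set.len (PySem.Set.inter query_terms
        (PySem.Set.ofList (PySem.Str.split₀ (PySem.Str.lower (PySem.Dict.getD (PySem.Dict.mk page) "text" "")))))
      if decide (0 < overlap) || query_terms.isEmpty then buckets.modify overlap [] (fun b => b ++ [page]) else buckets)
      PySem.Dict.empty
  let ranked : List (List (String × String)) :=
    (PySem.List.pyRange (PySem.Set.len query_terms) (-1) (-1)).foldl
      (fun ranked score => ranked ++ buckets.getD score []) []
  PySem.List.slice ranked none (some top_k)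

-- ===== PRECONDITION & SPEC =====
-- Pre_ excludes exactly the pages without a "text" key, on which Python's page["text"] raises KeyError.
def Pre_find_relevant_chunks (pages : List (List (String × String))) (query : String) (top_k : Int) : Prop :=
  pages.all (fun page => (PySem.Dict.mk page).contains "text") = true
instance (pages : List (List (String × String))) (query : String) (top_k : Int) : Decidable (Pre_find_relevant_chunks pages query top_k) := by unfold Pre_find_relevant_chunks; infer_instance

def pvWitness_find_relevant_chunks : (List (List (String × String))) × String × Int :=
  ([[("text", "alpha beta")], [("text", "beta gamma")], [("text", "delta")]], "Beta alpha", 2)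

def Spec_find_relevant_chunks (pages : List (List (String × String))) (query : String) (top_k : Int) (out : List (List (String × String))) : Prop := out = find_relevant_chunks_alt pages query top_k
instance (pages : List (List (String × String))) (query : String) (top_k : Int) (out : List (List (String × String))) : Decidable (Spec_find_relevant_chunks pages query top_k out) := by unfold Spec_find_relevant_chunks; infer_instance

-- ===== CLAIM (what is proved, stated in full; the proofs are below) =====
def Claim_equal_find_relevant_chunks : Prop := ∀ (pages : List (List (String × String))) (query : String) (top_k : Int), Dom_find_relevant_chunks pages query top_k → Pre_find_relevant_chunks pages query top_k → Spec_find_relevant_chunks pages query top_k (find_relevant_chunks pages query top_k)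

-- ===== LEMMAS AND PROOFS =====

-- the descending score range [N, N-1, ..., 0]
theorem pv_pyRange_desc (N : Int) (hN : 0 ≤ N) :
    PySem.List.pyRange N (-1) (-1) = (List.range (N+1).toNat).map (fun k : Nat => N - (k:Int)) := by
  have h1 : ¬ ((-1:Int) = 0) := by omega
  have h2 : ¬ ((0:Int) < -1) := by omega
  have h3 : (-1:Int) < N := by omega
  simp only [PySem.List.pyRange, if_neg h1, if_neg h2, if_pos h3]
  have hc : ((N - -1 + -(-1) - 1) / -(-1:Int)).toNat = (N+1).toNat := by norm_num
  rw [hc]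
  apply List.map_congr_left
  intro k _
  ring

theorem pv_desc_pairwise (N : Int) (hN : 0 ≤ N) :
    (PySem.List.pyRange N (-1) (-1)).Pairwise (fun a b => b < a) := by
  rw [pv_pyRange_desc N hN, List.pairwise_map]
  exact List.pairwise_lt_range.imp (by intro a b h; omega)

theorem pv_mem_desc (N s : Int) (hN : 0 ≤ N) (h0 : 0 ≤ s) (h1 : s ≤ N) :
    s ∈ PySem.List.pyRange N (-1) (-1) := by
  rw [pv_pyRange_desc N hN]
  exact List.mem_map.mpr ⟨(N - s).toNat, List.mem_range.mpr (by omega), by omega⟩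

-- insertBy passes over a block it does not insert before
theorem pv_insertBy_append_left {α : Type} (before : α → α → Bool) (x : α) (L1 L2 : List α)
    (h : ∀ y ∈ L1, before x y = false) :
    PySem.List.insertBy before x (L1 ++ L2) = L1 ++ PySem.List.insertBy before x L2 := by
  induction L1 with
  | nil => simp
  | cons y t ih =>
    simp only [List.cons_append, PySem.List.insertBy, h y (by simp)]
    rw [ih (fun z hz => h z (by simp [hz]))]
    simp

-- insertBy puts x in front when it goes before everything
theorem pv_insertBy_front {α : Type} (before : α → α → Bool) (x : α) (L : List α)
    (h : ∀ y ∈ L, before x y = true) :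
    PySem.List.insertBy before x L = x :: L := by
  cases L with
  | nil => rfl
  | cons z zs => simp [PySem.List.insertBy, h z (by simp)]

-- inserting x into a descending-bucket concatenation appends it to its own bucket
theorem pv_insert_flatMap {P : Type} (D : List Int) (x : Int × P) (F : Int → List (Int × P))
    (hD : D.Pairwise (fun a b => b < a)) (hx : x.1 ∈ D)
    (hF : ∀ s, ∀ y ∈ F s, y.1 = s) :
    PySem.List.insertBy (fun a b => decide (b.1 < a.1)) x (D.flatMap F)
      = D.flatMap (fun s => F s ++ if x.1 = s then [x] else []) := by
  induction D with
  | nil => simp at hx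
  | cons s D' ih =>
    rcases List.pairwise_cons.mp hD with ⟨hs, hD'⟩
    simp only [List.flatMap_cons]
    by_cases hxs : x.1 = s
    · have h1 : ∀ y ∈ F s, (decide (y.1 < x.1)) = false := by
        intro y hy; have := hF s y hy; simp [this, hxs]
      rw [pv_insertBy_append_left _ _ _ _ h1]
      have h2 : ∀ y ∈ D'.flatMap F, (decide (y.1 < x.1)) = true := by
        intro y hy
        rcases List.mem_flatMap.mp hy with ⟨t, ht, hyt⟩
        have := hF t y hyt
        have : y.1 < s := by rw [this]; exact hs t ht
        simp [hxs, this]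
      rw [pv_insertBy_front _ _ _ h2]
      have h3 : D'.flatMap (fun t => F t ++ if x.1 = t then [x] else []) = D'.flatMap F := by
        apply List.flatMap_congr
        intro t ht
        have : x.1 ≠ t := by
          intro h; rw [hxs] at h; have := hs t ht; omega
        simp [this]
      rw [h3]
      simp [hxs]
    · have hx' : x.1 ∈ D' := by rcases List.mem_cons.mp hx with h | h; exact absurd h hxs; exact h
      have hlt : x.1 < s := hs _ hx'
      have h1 : ∀ y ∈ F s, (decide (y.1 < x.1)) = false := by
        intro y hy; have := hF s y hy
        simp only [decide_eq_false_iff_not, not_lt]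
        rw [this]; omega
      rw [pv_insertBy_append_left _ _ _ _ h1, ih hD' hx']
      simp [hxs]

-- stable reverse sort of a score-bounded list is the descending-bucket concatenation
theorem pv_sorted_rev_eq_flatMap {P : Type} (D : List Int)
    (hD : D.Pairwise (fun a b => b < a)) :
    ∀ (S : List (Int × P)), (∀ p ∈ S, p.1 ∈ D) →
      PySem.List.sorted S (fun x => x.1) true = D.flatMap (fun s => S.filter (fun p => p.1 == s)) := by
  intro S
  induction S using List.reverseRecOn with
  | nil => intro _; simp [PySem.List.sorted]
  | append_singleton S' x ih =>
    intro h
    rw [PySem.List.sorted_rev_eq_foldl_insertBy, List.foldl_append]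
    simp only [List.foldl_cons, List.foldl_nil]
    rw [← PySem.List.sorted_rev_eq_foldl_insertBy,
        ih (fun p hp => h p (by simp [hp]))]
    rw [pv_insert_flatMap D x _ hD (h x (by simp))
        (fun s y hy => by simpa using (List.mem_filter.mp hy).2)]
    apply List.flatMap_congr
    intro s _
    simp [List.filter_append, List.filter_cons]

-- slice commutes with map
theorem pv_map_slice {α β : Type} (f : α → β) (xs : List α) (a b : Option Int) :
    (PySem.List.slice xs a b).map f = PySem.List.slice (xs.map f) a b := by
  simp [PySem.List.slice, List.map_take, List.map_drop]

-- A's sort-then-slice pipeline equals B's bucket-then-descending-walk pipeline, abstractly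
theorem pv_core {P : Type} (pages : List P) (ov : P → Int) (c : P → Bool) (N : Int) (hN : 0 ≤ N)
    (hb : ∀ pg, 0 ≤ ov pg ∧ ov pg ≤ N) (top_k : Int) :
    (PySem.List.slice (PySem.List.sorted
        (pages.foldl (fun acc pg => if c pg then acc ++ [(ov pg, pg)] else acc) [])
        (fun x => x.1) true) none (some top_k)).map (fun x => x.2)
      = PySem.List.slice
        ((PySem.List.pyRange N (-1) (-1)).foldl (fun acc s =>
            acc ++ (pages.foldl (fun d pg => if c pg then d.modify (ov pg) [] (fun b => b ++ [pg]) else d)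
              PySem.Dict.empty).getD s []) [])
        none (some top_k) := by
  have hA : pages.foldl (fun acc pg => if c pg then acc ++ [(ov pg, pg)] else acc) ([] : List (Int × P))
      = (pages.filter c).map (fun pg => (ov pg, pg)) := by
    rw [PySem.List.foldl_append_if]; simp
  have hB : pages.foldl (fun d pg => if c pg then d.modify (ov pg) [] (fun b => b ++ [pg]) else d)
        (PySem.Dict.empty : PySem.Dict Int (List P))
      = ((pages.filter c).map (fun pg => (ov pg, pg))).foldl
          (fun d p => d.modify p.1 [] (fun b => b ++ [p.2])) PySem.Dict.empty := by
    rw [List.foldl_map, List.foldl_filter]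
  rw [hA, hB]
  set S : List (Int × P) := (pages.filter c).map (fun pg => (ov pg, pg)) with hS
  have hget : ∀ s : Int, (S.foldl (fun d p => d.modify p.1 [] (fun b => b ++ [p.2]))
        (PySem.Dict.empty : PySem.Dict Int (List P))).getD s []
      = (S.filter (fun p => p.1 == s)).map (fun p => p.2) := by
    intro s; rw [PySem.Dict.getD_foldl_modify_append]; simp [PySem.Dict.empty, PySem.Dict.getD, PySem.Dict.get?]
  have hmem : ∀ p ∈ S, p.1 ∈ PySem.List.pyRange N (-1) (-1) := by
    intro p hp
    rcases List.mem_map.mp hp with ⟨pg, _, rfl⟩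
    exact pv_mem_desc N (ov pg) hN (hb pg).1 (hb pg).2
  rw [pv_map_slice, pv_sorted_rev_eq_flatMap _ (pv_desc_pairwise N hN) S hmem, List.map_flatMap,
      PySem.List.foldl_append_eq_flatMap]
  simp only [List.nil_append]
  congr 1
  apply List.flatMap_congr
  intro s _
  exact (hget s).symm

-- ===== VERDICT (by name: the statement is the Claim_ definition above) =====
theorem find_relevant_chunks_spec : Claim_equal_find_relevant_chunks := by
  intro pages query top_k _ _
  unfold Spec_find_relevant_chunks find_relevant_chunks find_relevant_chunks_alt
  have hb : ∀ pg : List (String × String),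
      0 ≤ PySem.Set.len (PySem.Set.inter (PySem.Set.ofList (PySem.Str.split₀ (PySem.Str.lower query)))
            (PySem.Set.ofList (PySem.Str.split₀ (PySem.Str.lower (PySem.Dict.getD (PySem.Dict.mk pg) "text" ""))))) ∧
      PySem.Set.len (PySem.Set.inter (PySem.Set.ofList (PySem.Str.split₀ (PySem.Str.lower query)))
            (PySem.Set.ofList (PySem.Str.split₀ (PySem.Str.lower (PySem.Dict.getD (PySem.Dict.mk pg) "text" "")))))
          ≤ PySem.Set.len (PySem.Set.ofList (PySem.Str.split₀ (PySem.Str.lower query))) := by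
    intro pg
    constructor
    · exact Int.natCast_nonneg _
    · simp only [PySem.Set.len, PySem.Set.inter]
      exact_mod_cast List.length_filter_le _ _
  exact pv_core pages _ _ _ (Int.natCast_nonneg _) hb top_k
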